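-- pv_equiv track=rewrite | github.com/SimonCB765/ProteinDatabaseManipulation | parsers/DEPRECATEDparseEntrez.py | find_disease_genes
-- ===== SOURCE A (Python) =====
-- def find_disease_genes(diseases, diseaseTypes, geneRIFDict):
--     diseaseGenes = dict([(i, ['N' for i in diseases]) for i in geneRIFDict.keys()])
--
--     for i in geneRIFDict.keys():
--         for j in geneRIFDict[i]:
--             for k in range(len(diseases)):
--                 for l in diseases[k]:
--                     if l in j:
--                         diseaseGenes[i][k] = 'Y'
--                         break
--
--     return diseaseGenes
-- ===== SOURCE B (Python) =====
-- def find_disease_genes(diseases, diseaseTypes, geneRIFDict):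
--     # Multi-pattern index built once: bucket the keywords by first character;
--     # groups containing an empty keyword match every text ('always').
--     buckets = {}
--     always = set()
--     for k in range(len(diseases)):
--         for kw in diseases[k]:
--             if kw:
--                 buckets.setdefault(kw[0], []).append((kw, k))
--             else:
--                 always.add(k)
--
--     def scan(text):
--         # position-major scan: at each position try only the keywords whose
--         # first character matches; returns the set of group indices matched
--         hit = set(always)
--         for pos in range(len(text)):
--             for kw, k in buckets.get(text[pos], ()):
--                 if text.startswith(kw, pos):
--                     hit.add(k)
--         return hit
--
--     cache = {}  # memoise per RIF text: repeated texts are scanned once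
--     result = {}
--     for gene, rifs in geneRIFDict.items():
--         hit = set()
--         for t in rifs:
--             if t not in cache:
--                 cache[t] = scan(t)
--             hit |= cache[t]
--         result[gene] = ['Y' if k in hit else 'N' for k in range(len(diseases))]
--     return result
-- ===== Notes on version B (the rewrite author's own statement) =====
-- stated objective: alternative
-- what changed: A mutates an all-'N' table with four nested loops testing 'keyword in text' per gene, text and group; B builds a multi-pattern index once (keywords bucketed by first character, empty keywords collected separately), computes for each text the SET of matched groups with a position-major scan that tries only the bucket of the current character, memoises that set per distinct RIF text in a dict, and assembles each gene's flags from the union of its texts' sets.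
import Mathlib
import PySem

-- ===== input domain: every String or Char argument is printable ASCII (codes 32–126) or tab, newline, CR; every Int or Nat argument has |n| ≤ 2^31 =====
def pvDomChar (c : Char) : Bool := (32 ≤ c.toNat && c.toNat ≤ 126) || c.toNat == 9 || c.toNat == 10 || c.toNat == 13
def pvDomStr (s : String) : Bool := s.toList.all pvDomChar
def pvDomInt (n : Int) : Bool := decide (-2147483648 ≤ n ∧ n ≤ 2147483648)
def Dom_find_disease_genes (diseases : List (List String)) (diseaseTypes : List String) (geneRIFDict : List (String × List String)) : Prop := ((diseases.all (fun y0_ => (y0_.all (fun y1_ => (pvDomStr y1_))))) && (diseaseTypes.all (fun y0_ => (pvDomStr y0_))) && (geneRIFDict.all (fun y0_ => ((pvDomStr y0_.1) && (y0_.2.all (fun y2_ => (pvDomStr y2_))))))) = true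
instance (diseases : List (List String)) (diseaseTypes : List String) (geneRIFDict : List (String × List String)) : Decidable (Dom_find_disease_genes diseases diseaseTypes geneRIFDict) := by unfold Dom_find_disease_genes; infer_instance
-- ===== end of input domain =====

-- B replaces A's keyword-major four-nested-loop table mutation by: a flat keyword→group
-- pattern index built once, a position-major multi-pattern scan computing per RIF text the
-- SET of matched groups, a per-text memo dict, and per-gene union of those sets (objective:
-- alternative). A mutates the inner lists of its dict in place, but the caller only sees the
-- returned dict, which is fresh.

-- ===== PORT A =====
-- the innermost 'for l in diseases[k]: if l in j: … break' loop (break = stop at first hit)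
def pvMatchA : List String → String → Bool
  | [], _ => false
  | l :: rest, j => if PySem.Str.isIn l j then true else pvMatchA rest j

def find_disease_genes (diseases : List (List String)) (diseaseTypes : List String) (geneRIFDict : List (String × List String)) : List (String × List String) :=
  let grd := PySem.Dict.ofList geneRIFDict
  -- diseaseGenes = dict([(i, ['N' for i in diseases]) for i in geneRIFDict.keys()])
  let diseaseGenes := PySem.Dict.ofList (grd.keys.map (fun i => (i, diseases.map (fun _ => "N"))))
  let final := grd.keys.foldl (fun dg i =>
      -- geneRIFDict[i]: i comes from keys(), so the lookup never raises — getD is exact here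
      (grd.getD i []).foldl (fun dg j =>
        (PySem.List.pyRange 0 (diseases.length : Int) 1).foldl (fun dg k =>
          if pvMatchA (PySem.List.pyGetD diseases k []) j
          -- diseaseGenes[i][k] = 'Y': i is a present key and 0 ≤ k < len(diseases) = len(value),
          -- so Python's in-place item assignment is exactly List.set at k.toNat
          then dg.modify i [] (fun v => v.set k.toNat "Y")
          else dg) dg) dg) diseaseGenes
  final.items

-- ===== PORT B =====
-- buckets/always: keywords bucketed by first character (kw[0] of a non-empty kw is exactly
-- toList.headD; Python's length-1-string keys correspond one-to-one to Chars), groups with an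
-- empty keyword collected in 'always'
def pvBuckets (diseases : List (List String)) : PySem.Dict Char (List (String × Int)) × PySem.Set Int :=
  (PySem.List.pyRange 0 (diseases.length : Int) 1).foldl (fun st k =>
    (PySem.List.pyGetD diseases k []).foldl (fun st kw =>
      if kw ≠ "" then (st.1.modify (kw.toList.headD ' ') [] (· ++ [(kw, k)]), st.2)
      else (st.1, PySem.Set.add st.2 k)) st)
    (PySem.Dict.empty, PySem.Set.empty)

-- scan(text): position-major scan trying only the bucket of text[pos] (pos < len(text), so
-- text[pos] is toList.getD; text.startswith(kw, pos) with 0 ≤ pos is 'kw is a prefix of text[pos:]')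
def pvScan (buckets : PySem.Dict Char (List (String × Int))) (always : PySem.Set Int) (text : String) : PySem.Set Int :=
  (PySem.List.pyRange 0 (PySem.Str.len text : Int) 1).foldl (fun hit pos =>
    (buckets.getD (text.toList.getD pos.toNat ' ') []).foldl (fun hit p =>
      if PySem.Chars.startswith (text.toList.drop pos.toNat) p.1.toList
      then PySem.Set.add hit p.2 else hit) hit)
    (PySem.Set.ofList always)

def find_disease_genes_alt (diseases : List (List String)) (diseaseTypes : List String) (geneRIFDict : List (String × List String)) : List (String × List String) :=
  let bk := pvBuckets diseases
  let final := (PySem.Dict.ofList geneRIFDict).items.foldl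
    (fun (st : PySem.Dict String (PySem.Set Int) × PySem.Dict String (List String)) gr =>
      -- for t in rifs: if t not in cache: cache[t] = scan(t); hit |= cache[t]
      let ch := gr.2.foldl
        (fun (ch : PySem.Dict String (PySem.Set Int) × PySem.Set Int) t =>
          let cache := if ch.1.contains t then ch.1 else ch.1.insert t (pvScan bk.1 bk.2 t)
          (cache, PySem.Set.union ch.2 (cache.getD t PySem.Set.empty)))
        (st.1, PySem.Set.empty)
      -- result[gene] = ['Y' if k in hit else 'N' for k in range(len(diseases))]
      (ch.1, st.2.insert gr.1 ((PySem.List.pyRange 0 (diseases.length : Int) 1).map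
        (fun k => if PySem.Set.contains ch.2 k then "Y" else "N"))))
    (PySem.Dict.empty, PySem.Dict.empty)
  final.2.items

-- ===== PRECONDITION & SPEC =====
def Spec_find_disease_genes (diseases : List (List String)) (diseaseTypes : List String) (geneRIFDict : List (String × List String)) (out : List (String × List String)) : Prop := out = find_disease_genes_alt diseases diseaseTypes geneRIFDict
instance (diseases : List (List String)) (diseaseTypes : List String) (geneRIFDict : List (String × List String)) (out : List (String × List String)) : Decidable (Spec_find_disease_genes diseases diseaseTypes geneRIFDict out) := by unfold Spec_find_disease_genes; infer_instance

-- ===== CLAIM (what is proved, stated in full; the proofs are below) =====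
def Claim_equal_find_disease_genes : Prop := ∀ (diseases : List (List String)) (diseaseTypes : List String) (geneRIFDict : List (String × List String)), Dom_find_disease_genes diseases diseaseTypes geneRIFDict → Spec_find_disease_genes diseases diseaseTypes geneRIFDict (find_disease_genes diseases diseaseTypes geneRIFDict)

-- ===== LEMMAS AND PROOFS =====

-- the canonical per-gene flag list both programs compute
def pvCanon (diseases : List (List String)) (rifs : List String) : List String :=
  diseases.map (fun group =>
    if group.any (fun kw => rifs.any (fun t => PySem.Str.isIn kw t)) then "Y" else "N")

-- ---------- A = canonical ----------

theorem pvMatchA_eq_any (ls : List String) (j : String) :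
    pvMatchA ls j = ls.any (fun l => PySem.Str.isIn l j) := by
  induction ls with
  | nil => rfl
  | cons l rest ih => simp [pvMatchA, ih]

-- getD through a fold of conditional modifies at one fixed key
theorem getD_chain {β : Type} (l : List β) (c : β → Bool) (u : β → List String → List String)
    (i g : String) (d : PySem.Dict String (List String)) :
    (l.foldl (fun dg x => if c x then dg.modify i [] (u x) else dg) d).getD g [] =
      if g = i then l.foldl (fun v x => if c x then u x v else v) (d.getD i []) else d.getD g [] := by
  induction l generalizing d with
  | nil => by_cases hg : g = i <;> simp [hg]
  | cons x rest ih =>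
    simp only [List.foldl_cons]
    by_cases hc : c x
    · simp only [hc, if_pos]
      rw [ih]
      by_cases hg : g = i <;> simp [hg, PySem.Dict.getD_modify]
    · simp [hc, ih]

-- keys are unchanged through that fold when the touched key is present
theorem keys_chain {β : Type} (l : List β) (c : β → Bool) (u : β → List String → List String)
    (i : String) (d : PySem.Dict String (List String)) (hi : i ∈ d.keys) :
    (l.foldl (fun dg x => if c x then dg.modify i [] (u x) else dg) d).keys = d.keys := by
  induction l generalizing d with
  | nil => rfl
  | cons x rest ih =>
    simp only [List.foldl_cons]
    by_cases hc : c x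
    · have hcon : d.contains i = true := (PySem.Dict.contains_iff_mem_keys ..).2 hi
      have hk : (d.modify i [] (u x)).keys = d.keys := by
        rw [PySem.Dict.keys_modify]
        exact PySem.Dict.keys_insert_of_contains d _ hcon
      rw [if_pos hc, ih _ (by rw [hk]; exact hi), hk]
    · rw [if_neg hc]; exact ih _ hi

-- getD through the outer fold over distinct keys, one self-contained step per key
theorem getD_outer (ks : List String) (hnd : ks.Nodup)
    (P : String → List String → List String)
    (S : PySem.Dict String (List String) → String → PySem.Dict String (List String))
    (hS : ∀ dg i g, (S dg i).getD g [] = if g = i then P i (dg.getD i []) else dg.getD g [])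
    (d : PySem.Dict String (List String)) (g : String) :
    (ks.foldl S d).getD g [] = if g ∈ ks then P g (d.getD g []) else d.getD g [] := by
  induction ks generalizing d with
  | nil => simp
  | cons i rest ih =>
    simp only [List.foldl_cons]
    rw [ih (List.Nodup.of_cons hnd)]
    by_cases hg : g = i
    · subst hg
      have : g ∉ rest := (List.nodup_cons.1 hnd).1
      simp [this, hS]
    · simp [hS, hg, List.mem_cons]

theorem keys_outer (ks : List String)
    (S : PySem.Dict String (List String) → String → PySem.Dict String (List String))
    (hk : ∀ dg i, i ∈ dg.keys → (S dg i).keys = dg.keys)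
    (d : PySem.Dict String (List String)) (h : ∀ i ∈ ks, i ∈ d.keys) :
    (ks.foldl S d).keys = d.keys := by
  induction ks generalizing d with
  | nil => rfl
  | cons i rest ih =>
    simp only [List.foldl_cons]
    have hki := hk d i (h i (by simp))
    rw [ih _ (fun x hx => by rw [hki]; exact h x (by simp [hx])), hki]

-- positional characterisation of the fold of conditional index-sets
theorem foldl_set_getElem? {β : Type} (ps : List β) (q : β → Bool) (idx : β → Nat)
    (v : List String) (m : Nat) :
    (ps.foldl (fun v p => if q p then v.set (idx p) "Y" else v) v)[m]? =
      if ps.any (fun p => q p && idx p == m)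
      then (if m < v.length then some "Y" else none) else v[m]? := by
  induction ps generalizing v with
  | nil => simp
  | cons p rest ih =>
    simp only [List.foldl_cons, List.any_cons]
    by_cases hq : q p
    · rw [if_pos hq, ih]
      by_cases hm : idx p = m
      · simp only [hq, hm, beq_self_eq_true, Bool.and_true, Bool.true_or, if_pos]
        simp [List.getElem?_set]
      · have : (v.set (idx p) "Y")[m]? = v[m]? := by simp [hm]
        simp [hq, hm, this]
    · simp [hq, ih]

-- the per-gene value computed by A's inner loops is the canonical flag list
theorem value_eq (diseases : List (List String)) (rifs : List String) :
    (rifs.flatMap (fun j => (PySem.List.pyRange 0 (diseases.length : Int) 1).map (fun k => (j, k)))).foldl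
        (fun v p => if pvMatchA (PySem.List.pyGetD diseases p.2 []) p.1 then v.set p.2.toNat "Y" else v)
        (diseases.map (fun _ => "N")) =
      pvCanon diseases rifs := by
  unfold pvCanon
  apply List.ext_getElem?
  intro m
  have h := foldl_set_getElem?
      (rifs.flatMap (fun j => (PySem.List.pyRange 0 (diseases.length : Int) 1).map (fun k => (j, k))))
      (fun p => pvMatchA (PySem.List.pyGetD diseases p.2 []) p.1) (fun p => p.2.toNat)
      (diseases.map (fun _ => "N")) m
  simp only [] at h
  rw [h]
  by_cases hm : m < diseases.length
  · have hany : (rifs.flatMap (fun j => (PySem.List.pyRange 0 (diseases.length : Int) 1).map (fun k => (j, k)))).any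
        (fun p => pvMatchA (PySem.List.pyGetD diseases p.2 []) p.1 && p.2.toNat == m) =
        diseases[m].any (fun kw => rifs.any (fun t => PySem.Str.isIn kw t)) := by
      rw [Bool.eq_iff_iff]
      simp only [List.any_eq_true, List.mem_flatMap, List.mem_map, PySem.List.mem_pyRange_one,
        pvMatchA_eq_any, Bool.and_eq_true, beq_iff_eq]
      constructor
      · rintro ⟨p, ⟨j, hj, k, ⟨hk0, hkn⟩, rfl⟩, hmatch, hidx⟩
        have hkm : k = (m : Int) := by omega
        rcases hmatch with ⟨kw, hkw, hin⟩
        rw [show (j, k).2 = (m : Int) from hkm, PySem.List.pyGetD_natCast] at hkw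
        exact ⟨kw, by simpa [List.getD, List.getElem?_eq_getElem hm] using hkw, j, hj, hin⟩
      · rintro ⟨kw, hkw, j, hj, hin⟩
        refine ⟨(j, (m : Int)), ⟨j, hj, (m : Int), ⟨by omega, by omega⟩, rfl⟩, ⟨kw, ?_, hin⟩, by simp⟩
        rw [PySem.List.pyGetD_natCast]
        simpa [List.getD, List.getElem?_eq_getElem hm] using hkw
    rw [hany]
    simp only [List.getElem?_map, List.getElem?_eq_getElem hm, List.length_map, hm, if_pos,
      Option.map_some]
    split_ifs <;> rfl
  · have : ¬ ((rifs.flatMap (fun j => (PySem.List.pyRange 0 (diseases.length : Int) 1).map (fun k => (j, k)))).any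
        (fun p => pvMatchA (PySem.List.pyGetD diseases p.2 []) p.1 && p.2.toNat == m) = true) := by
      simp only [List.any_eq_true, List.mem_flatMap, List.mem_map, PySem.List.mem_pyRange_one,
        Bool.and_eq_true, beq_iff_eq]
      rintro ⟨p, ⟨j, hj, k, ⟨hk0, hkn⟩, rfl⟩, _, hidx⟩
      omega
    simp only [Bool.not_eq_true] at this
    rw [this]
    simp [hm]

theorem find_disease_genes_eq_canon (diseases : List (List String)) (diseaseTypes : List String)
    (geneRIFDict : List (String × List String)) :
    find_disease_genes diseases diseaseTypes geneRIFDict =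
      (PySem.Dict.ofList geneRIFDict).items.map (fun p => (p.1, pvCanon diseases p.2)) := by
  unfold find_disease_genes
  dsimp only []
  set grd := PySem.Dict.ofList geneRIFDict with hgrd
  have hnd : grd.keys.Nodup := PySem.Dict.nodup_keys_ofList _
  set ns : List String := diseases.map (fun _ => "N") with hns
  set dg0 := PySem.Dict.ofList (grd.keys.map (fun i => (i, ns))) with hdg0
  have hitems0 : dg0.items = grd.keys.map (fun i => (i, ns)) := by
    rw [hdg0]
    show ((grd.keys.map (fun i => (i, ns))).foldl (fun d p => d.insert p.1 p.2) PySem.Dict.empty).items = _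
    rw [List.foldl_map]
    rw [PySem.Dict.items_foldl_insert_fresh (k := fun i => i) (v := fun _ => ns) _ _
      (fun a _ => PySem.Dict.contains_empty a) (by simpa using hnd)]
    rfl
  have hkeys0 : dg0.keys = grd.keys := by
    show dg0.items.map (·.1) = _
    rw [hitems0, List.map_map]; simp [Function.comp_def]
  have hnd0 : dg0.keys.Nodup := by rw [hkeys0]; exact hnd
  have hget0 : ∀ g ∈ grd.keys, dg0.getD g [] = ns := by
    intro g hg
    exact PySem.Dict.getD_of_mem_items dg0 (by rw [hitems0]; exact List.mem_map_of_mem hg) hnd0 []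
  set S := fun (dg : PySem.Dict String (List String)) (i : String) =>
      (grd.getD i []).foldl (fun dg j =>
        (PySem.List.pyRange 0 (diseases.length : Int) 1).foldl (fun dg k =>
          if pvMatchA (PySem.List.pyGetD diseases k []) j
          then dg.modify i [] (fun v => v.set k.toNat "Y") else dg) dg) dg with hs
  set P := fun (i : String) (v : List String) =>
      ((grd.getD i []).flatMap (fun j => (PySem.List.pyRange 0 (diseases.length : Int) 1).map (fun k => (j, k)))).foldl
        (fun v p => if pvMatchA (PySem.List.pyGetD diseases p.2 []) p.1 then v.set p.2.toNat "Y" else v) v with hp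
  have hflat : ∀ dg i, S dg i =
      ((grd.getD i []).flatMap (fun j => (PySem.List.pyRange 0 (diseases.length : Int) 1).map (fun k => (j, k)))).foldl
        (fun dg p => if pvMatchA (PySem.List.pyGetD diseases p.2 []) p.1
          then dg.modify i [] (fun v => v.set p.2.toNat "Y") else dg) dg := by
    intro dg i
    rw [hs, List.foldl_flatMap]
    simp only [List.foldl_map]
  have hS : ∀ dg i g, (S dg i).getD g [] = if g = i then P i (dg.getD i []) else dg.getD g [] := by
    intro dg i g
    rw [hflat, getD_chain]
  have hSk : ∀ dg i, i ∈ dg.keys → (S dg i).keys = dg.keys := by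
    intro dg i hi
    rw [hflat]; exact keys_chain _ _ _ _ _ hi
  have hfk : (grd.keys.foldl S dg0).keys = grd.keys := by
    rw [keys_outer _ _ hSk _ (fun i hi => by rw [hkeys0]; exact hi), hkeys0]
  have hfget : ∀ g ∈ grd.keys, (grd.keys.foldl S dg0).getD g [] = pvCanon diseases (grd.getD g []) := by
    intro g hg
    rw [getD_outer _ hnd P S hS, if_pos hg, hget0 g hg, hp]
    exact value_eq diseases (grd.getD g [])
  rw [PySem.Dict.items_eq_map_keys _ (by rw [hfk]; exact hnd) [], hfk,
      PySem.Dict.items_eq_map_keys grd hnd [], List.map_map]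
  refine List.map_congr_left (fun g hg => ?_)
  simp only [Function.comp_apply]
  rw [hfget g hg]

-- ---------- B = canonical ----------

-- membership through a fold of conditional Set.add over a pattern list
theorem mem_foldl_add_if (ps : List (String × Int)) (c : String × Int → Bool)
    (s0 : PySem.Set Int) (k : Int) :
    (k ∈ ps.foldl (fun s p => if c p then PySem.Set.add s p.2 else s) s0) ↔
      k ∈ s0 ∨ ∃ p ∈ ps, c p ∧ p.2 = k := by
  induction ps generalizing s0 with
  | nil => simp
  | cons p rest ih =>
    simp only [List.foldl_cons]
    by_cases hc : c p
    · rw [if_pos hc, ih]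
      simp only [PySem.Set.mem_add, List.mem_cons]
      constructor
      · rintro (⟨h | h⟩ | ⟨q, hq, hcq, hqk⟩)
        · exact Or.inl h
        · exact Or.inr ⟨p, Or.inl rfl, hc, h.symm⟩
        · exact Or.inr ⟨q, Or.inr hq, hcq, hqk⟩
      · rintro (h | ⟨q, hq | hq, hcq, hqk⟩)
        · exact Or.inl (Or.inl h)
        · exact Or.inl (Or.inr (hq ▸ hqk).symm)
        · exact Or.inr ⟨q, hq, hcq, hqk⟩
    · rw [if_neg hc, ih]
      simp only [List.mem_cons]
      constructor
      · rintro (h | ⟨q, hq, hcq, hqk⟩)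
        · exact Or.inl h
        · exact Or.inr ⟨q, Or.inr hq, hcq, hqk⟩
      · rintro (h | ⟨q, hq | hq, hcq, hqk⟩)
        · exact Or.inl h
        · exact absurd hcq (by rw [hq]; exact fun h' => hc h')
        · exact Or.inr ⟨q, hq, hcq, hqk⟩

-- membership through pvScan's double fold
theorem mem_pvScan (buckets : PySem.Dict Char (List (String × Int))) (always : PySem.Set Int)
    (text : String) (k : Int) :
    k ∈ pvScan buckets always text ↔
      k ∈ always ∨ ∃ pos ∈ PySem.List.pyRange 0 (PySem.Str.len text : Int) 1,
        ∃ p ∈ buckets.getD (text.toList.getD pos.toNat ' ') [],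
          PySem.Chars.startswith (text.toList.drop pos.toNat) p.1.toList = true ∧ p.2 = k := by
  unfold pvScan
  generalize PySem.List.pyRange 0 (PySem.Str.len text : Int) 1 = l
  have gen : ∀ (s0 : PySem.Set Int),
      (k ∈ l.foldl (fun hit pos => (buckets.getD (text.toList.getD pos.toNat ' ') []).foldl (fun hit p =>
        if PySem.Chars.startswith (text.toList.drop pos.toNat) p.1.toList
        then PySem.Set.add hit p.2 else hit) hit) s0) ↔
      k ∈ s0 ∨ ∃ pos ∈ l, ∃ p ∈ buckets.getD (text.toList.getD pos.toNat ' ') [],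
        PySem.Chars.startswith (text.toList.drop pos.toNat) p.1.toList = true ∧ p.2 = k := by
    induction l with
    | nil => simp
    | cons pos rest ih =>
      intro s0
      simp only [List.foldl_cons]
      rw [ih, mem_foldl_add_if]
      simp only [List.mem_cons]
      constructor
      · rintro (⟨h | ⟨p, hp, hc, hk⟩⟩ | ⟨q, hq, p, hp, hc, hk⟩)
        · exact Or.inl h
        · exact Or.inr ⟨pos, Or.inl rfl, p, hp, hc, hk⟩
        · exact Or.inr ⟨q, Or.inr hq, p, hp, hc, hk⟩
      · rintro (h | ⟨q, hq | hq, p, hp, hc, hk⟩)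
        · exact Or.inl (Or.inl h)
        · exact Or.inl (Or.inr ⟨p, by rw [← hq]; exact hp, by rw [← hq]; exact hc, hk⟩)
        · exact Or.inr ⟨q, hq, p, hp, hc, hk⟩
  rw [gen]
  rw [PySem.Set.mem_ofList]

-- the flat pattern list the bucket-building loop processes
def pvPat (diseases : List (List String)) : List (String × Int) :=
  (List.range diseases.length).flatMap
    (fun k => (diseases.getD k []).map (fun kw => (kw, (k : Int))))

theorem mem_pvPat (diseases : List (List String)) (p : String × Int) :
    p ∈ pvPat diseases ↔
      ∃ k : Nat, k < diseases.length ∧ p.2 = (k : Int) ∧ p.1 ∈ diseases.getD k [] := by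
  unfold pvPat
  simp only [List.mem_flatMap, List.mem_range, List.mem_map]
  constructor
  · rintro ⟨k, hk, kw, hkw, rfl⟩
    exact ⟨k, hk, rfl, hkw⟩
  · rintro ⟨k, hk, h2, h1⟩
    exact ⟨k, hk, p.1, h1, by rw [← h2]⟩

-- the bucket-building step, as a fold over the flat pattern list
def pvBStep (st : PySem.Dict Char (List (String × Int)) × PySem.Set Int) (p : String × Int) :
    PySem.Dict Char (List (String × Int)) × PySem.Set Int :=
  if p.1 ≠ "" then (st.1.modify (p.1.toList.headD ' ') [] (· ++ [p]), st.2)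
  else (st.1, PySem.Set.add st.2 p.2)

theorem pvBuckets_eq_foldl (diseases : List (List String)) :
    pvBuckets diseases = (pvPat diseases).foldl pvBStep (PySem.Dict.empty, PySem.Set.empty) := by
  unfold pvBuckets pvPat pvBStep
  have h1 : ∀ (st : PySem.Dict Char (List (String × Int)) × PySem.Set Int) (k : Int),
      (PySem.List.pyGetD diseases k []).foldl (fun st kw =>
        if kw ≠ "" then (st.1.modify (kw.toList.headD ' ') [] (· ++ [(kw, k)]), st.2)
        else (st.1, PySem.Set.add st.2 k)) st =
      ((PySem.List.pyGetD diseases k []).map (fun kw => (kw, k))).foldl (fun st p =>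
        if p.1 ≠ "" then (st.1.modify (p.1.toList.headD ' ') [] (· ++ [p]), st.2)
        else (st.1, PySem.Set.add st.2 p.2)) st := by
    intro st k
    rw [List.foldl_map]
  rw [PySem.List.foldl_congr_mem _ _ _ _ (fun acc x _ => h1 acc x)]
  rw [← List.foldl_flatMap, PySem.List.pyRange_zero_natCast, List.flatMap_map]
  have h3 : (fun (k : Nat) => (PySem.List.pyGetD diseases ((k : Nat) : Int) []).map (fun kw => (kw, ((k : Nat) : Int)))) =
      (fun (k : Nat) => (diseases.getD k []).map (fun kw => (kw, ((k : Nat) : Int)))) := by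
    funext k
    rw [PySem.List.pyGetD_natCast]
  rw [h3]

-- membership in the built buckets and 'always' set, by induction over the pattern list
theorem pvBStep_fold_mem (l : List (String × Int))
    (st : PySem.Dict Char (List (String × Int)) × PySem.Set Int) :
    (∀ c (p : String × Int), p ∈ (l.foldl pvBStep st).1.getD c [] ↔
        p ∈ st.1.getD c [] ∨ (p ∈ l ∧ p.1 ≠ "" ∧ p.1.toList.headD ' ' = c)) ∧
    (∀ k : Int, k ∈ (l.foldl pvBStep st).2 ↔ k ∈ st.2 ∨ ("", k) ∈ l) := by
  induction l generalizing st with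
  | nil => simp
  | cons q rest ih =>
    simp only [List.foldl_cons]
    rcases ih (pvBStep st q) with ⟨ih1, ih2⟩
    constructor
    · intro c p
      rw [ih1]
      unfold pvBStep
      by_cases hq : q.1 ≠ ""
      · rw [if_pos hq]
        simp only [PySem.Dict.getD_modify, List.mem_cons]
        by_cases hc : c = q.1.toList.headD ' '
        · subst hc
          rw [if_pos rfl]
          simp only [List.mem_append, List.mem_singleton]
          constructor
          · rintro ((h | h) | ⟨h1, h2, h3⟩)
            · exact Or.inl h
            · exact Or.inr ⟨Or.inl h, h ▸ hq, by rw [h]⟩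
            · exact Or.inr ⟨Or.inr h1, h2, h3⟩
          · rintro (h | ⟨h1 | h1, h2, h3⟩)
            · exact Or.inl (Or.inl h)
            · exact Or.inl (Or.inr h1)
            · exact Or.inr ⟨h1, h2, h3⟩
        · rw [if_neg hc]
          constructor
          · rintro (h | ⟨h1, h2, h3⟩)
            · exact Or.inl h
            · exact Or.inr ⟨Or.inr h1, h2, h3⟩
          · rintro (h | ⟨h1 | h1, h2, h3⟩)
            · exact Or.inl h
            · exact absurd (h1 ▸ h3).symm hc
            · exact Or.inr ⟨h1, h2, h3⟩
      · rw [if_neg hq]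
        simp only [List.mem_cons]
        rw [not_ne_iff] at hq
        constructor
        · rintro (h | ⟨h1, h2, h3⟩)
          · exact Or.inl h
          · exact Or.inr ⟨Or.inr h1, h2, h3⟩
        · rintro (h | ⟨h1 | h1, h2, h3⟩)
          · exact Or.inl h
          · exact absurd (h1 ▸ hq) h2
          · exact Or.inr ⟨h1, h2, h3⟩
    · intro k
      rw [ih2]
      unfold pvBStep
      by_cases hq : q.1 ≠ ""
      · rw [if_pos hq]
        simp only [List.mem_cons]
        constructor
        · rintro (h | h)
          · exact Or.inl h
          · exact Or.inr (Or.inr h)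
        · rintro (h | h | h)
          · exact Or.inl h
          · exact absurd (congrArg Prod.fst h).symm hq
          · exact Or.inr h
      · rw [if_neg hq]
        rw [not_ne_iff] at hq
        simp only [PySem.Set.mem_add, List.mem_cons]
        constructor
        · rintro ((h | h) | h)
          · exact Or.inl h
          · exact Or.inr (Or.inl (by rw [← hq, h, Prod.mk.eta]))
          · exact Or.inr (Or.inr h)
        · rintro (h | h | h)
          · exact Or.inl (Or.inl h)
          · exact Or.inl (Or.inr (congrArg Prod.snd h))
          · exact Or.inr h

theorem mem_buckets (diseases : List (List String)) (c : Char) (p : String × Int) :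
    p ∈ (pvBuckets diseases).1.getD c [] ↔
      p ∈ pvPat diseases ∧ p.1 ≠ "" ∧ p.1.toList.headD ' ' = c := by
  rw [pvBuckets_eq_foldl]
  rw [(pvBStep_fold_mem (pvPat diseases) (PySem.Dict.empty, PySem.Set.empty)).1]
  simp [PySem.Dict.getD_empty]

theorem mem_always (diseases : List (List String)) (k : Int) :
    k ∈ (pvBuckets diseases).2 ↔ ("", k) ∈ pvPat diseases := by
  rw [pvBuckets_eq_foldl]
  rw [(pvBStep_fold_mem (pvPat diseases) (PySem.Dict.empty, PySem.Set.empty)).2]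
  simp [PySem.Set.empty]

-- the bucketed position scan finds exactly Python's 'kw in text', for every keyword
theorem mem_pvScan_iff_isIn (diseases : List (List String)) (text : String) (k : Int) :
    k ∈ pvScan (pvBuckets diseases).1 (pvBuckets diseases).2 text ↔
      ∃ kw, (kw, k) ∈ pvPat diseases ∧ PySem.Str.isIn kw text = true := by
  rw [mem_pvScan]
  constructor
  · rintro (h | ⟨pos, hpos, p, hp, hsw, hpk⟩)
    · rcases (mem_always diseases k).1 h with hmem
      exact ⟨"", hmem, by
        have : PySem.Chars.isIn ("" : String).toList text.toList = true := PySem.Chars.isIn_nil _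
        simpa using this⟩
    · rcases (mem_buckets diseases _ p).1 hp with ⟨hmem, _, _⟩
      have hpre : p.1.toList <+: text.toList.drop pos.toNat := (PySem.Chars.startswith_iff ..).1 hsw
      have hin : PySem.Chars.isIn p.1.toList text.toList = true :=
        (PySem.Chars.exists_prefix_drop_iff_isIn ..).1 ⟨pos.toNat, hpre⟩
      exact ⟨p.1, by rw [← hpk]; exact hmem, by simpa using hin⟩
  · rintro ⟨kw, hmem, hin⟩
    by_cases hkw : kw = ""
    · exact Or.inl ((mem_always diseases k).2 (hkw ▸ hmem))
    · have : PySem.Chars.isIn kw.toList text.toList = true := by simpa using hin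
      rcases (PySem.Chars.exists_prefix_drop_iff_isIn ..).2 this with ⟨j, hpre⟩
      have hkwne : kw.toList ≠ [] := fun h => hkw (String.toList_inj.mp (by rw [h]; rfl))
      have hj : j < text.toList.length := by
        by_contra hge
        rw [List.drop_eq_nil_of_le (by omega)] at hpre
        exact hkwne (List.prefix_nil.1 hpre)
      refine Or.inr ⟨(j : Int), ?_, (kw, k), ?_, ?_, rfl⟩
      · rw [PySem.List.mem_pyRange_one]
        have : (PySem.Str.len text : Int) = (text.toList.length : Int) := by
          simp [PySem.Str.len]
        omega
      · rw [mem_buckets]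
        refine ⟨hmem, hkw, ?_⟩
        -- the first character of kw equals text[j], because kw is a prefix of text[j:]
        rcases hpre with ⟨tl, htl⟩
        have hhead : (text.toList.drop j).headD ' ' = kw.toList.headD ' ' := by
          rw [← htl]
          cases hkl : kw.toList with
          | nil => exact absurd hkl hkwne
          | cons a as => simp
        have hgetD : text.toList.getD j ' ' = (text.toList.drop j).headD ' ' := by
          rw [List.getD_eq_getElem?_getD, List.headD_eq_head?_getD, List.head?_drop]
        have hto : ((j : Int)).toNat = j := by simp
        rw [hto, hgetD, hhead]
      · rw [(PySem.Chars.startswith_iff ..)]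
        simpa using hpre

-- the cache invariant: every stored value is the scan of its key
def pvInv (scanf : String → PySem.Set Int) (c : PySem.Dict String (PySem.Set Int)) : Prop :=
  ∀ t v, c.get? t = some v → v = scanf t

-- one gene's inner fold: the cache invariant is preserved and the hit set is the union of scans
theorem gene_fold (scanf : String → PySem.Set Int) (rifs : List String)
    (c : PySem.Dict String (PySem.Set Int)) (h : PySem.Set Int) (hc : pvInv scanf c) :
    pvInv scanf (rifs.foldl
        (fun (ch : PySem.Dict String (PySem.Set Int) × PySem.Set Int) t =>
          let cache := if ch.1.contains t then ch.1 else ch.1.insert t (scanf t)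
          (cache, PySem.Set.union ch.2 (cache.getD t PySem.Set.empty))) (c, h)).1 ∧
    ∀ k, (k ∈ (rifs.foldl
        (fun (ch : PySem.Dict String (PySem.Set Int) × PySem.Set Int) t =>
          let cache := if ch.1.contains t then ch.1 else ch.1.insert t (scanf t)
          (cache, PySem.Set.union ch.2 (cache.getD t PySem.Set.empty))) (c, h)).2 ↔
      k ∈ h ∨ ∃ t ∈ rifs, k ∈ scanf t) := by
  induction rifs generalizing c h with
  | nil => exact ⟨hc, by simp⟩
  | cons t rest ih =>
    simp only [List.foldl_cons]
    by_cases hct : c.contains t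
    · simp only [hct, if_pos]
      have hval : c.getD t PySem.Set.empty = scanf t := by
        have hsome : (c.get? t).isSome = true := by
          rw [← PySem.Dict.contains_eq_isSome_get? (d := c) (k := t)]; exact hct
        rcases Option.isSome_iff_exists.1 hsome with ⟨v, hv⟩
        rw [PySem.Dict.getD_eq_get?_getD, hv, Option.getD_some]
        exact hc t v hv
      rcases ih c (PySem.Set.union h (c.getD t PySem.Set.empty)) hc with ⟨h1, h2⟩
      refine ⟨h1, fun k => ?_⟩
      rw [h2 k, hval]
      simp only [PySem.Set.mem_union, List.mem_cons]
      constructor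
      · rintro ((hk | hk) | ⟨t', ht', hk⟩)
        · exact Or.inl hk
        · exact Or.inr ⟨t, Or.inl rfl, hk⟩
        · exact Or.inr ⟨t', Or.inr ht', hk⟩
      · rintro (hk | ⟨t', ht' | ht', hk⟩)
        · exact Or.inl (Or.inl hk)
        · exact Or.inl (Or.inr (ht' ▸ hk))
        · exact Or.inr ⟨t', ht', hk⟩
    · simp only [hct, if_neg, Bool.false_eq_true, not_false_iff]
      set c' := c.insert t (scanf t) with hc'
      have hinv' : pvInv scanf c' := by
        intro t' v hv
        rw [hc', PySem.Dict.get?_insert] at hv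
        split_ifs at hv with ht'
        · cases hv; subst ht'; rfl
        · exact hc t' v hv
      have hval : c'.getD t PySem.Set.empty = scanf t := by
        rw [hc', PySem.Dict.getD_insert_self]
      rcases ih c' (PySem.Set.union h (c'.getD t PySem.Set.empty)) hinv' with ⟨h1, h2⟩
      refine ⟨h1, fun k => ?_⟩
      rw [h2 k, hval]
      simp only [PySem.Set.mem_union, List.mem_cons]
      constructor
      · rintro ((hk | hk) | ⟨t', ht', hk⟩)
        · exact Or.inl hk
        · exact Or.inr ⟨t, Or.inl rfl, hk⟩
        · exact Or.inr ⟨t', Or.inr ht', hk⟩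
      · rintro (hk | ⟨t', ht' | ht', hk⟩)
        · exact Or.inl (Or.inl hk)
        · exact Or.inl (Or.inr (ht' ▸ hk))
        · exact Or.inr ⟨t', ht', hk⟩

-- a hit set with the right membership yields the canonical flag list
theorem flags_eq_canon (diseases : List (List String)) (rifs : List String) (hit : PySem.Set Int)
    (hhit : ∀ k, k ∈ hit ↔ ∃ t ∈ rifs, k ∈ pvScan (pvBuckets diseases).1 (pvBuckets diseases).2 t) :
    (PySem.List.pyRange 0 (diseases.length : Int) 1).map
        (fun k => if PySem.Set.contains hit k then "Y" else "N") =
      pvCanon diseases rifs := by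
  unfold pvCanon
  rw [PySem.List.pyRange_zero_natCast, List.map_map]
  apply List.ext_getElem (by simp)
  intro m h1 h2
  simp only [List.getElem_map, List.getElem_range, Function.comp_apply]
  have hm : m < diseases.length := by simpa using h2
  have hmem : ((m : Int) ∈ hit) ↔
      (diseases[m].any (fun kw => rifs.any (fun t => PySem.Str.isIn kw t)) = true) := by
    rw [hhit]
    simp only [List.any_eq_true]
    constructor
    · rintro ⟨t, ht, hk⟩
      rcases (mem_pvScan_iff_isIn diseases t (m : Int)).1 hk with ⟨kw, hmem, hin⟩
      rcases (mem_pvPat ..).1 hmem with ⟨k', hk', hpk', hkw⟩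
      have hpk2 : ((m : Int)) = (k' : Int) := hpk'
      have : k' = m := by exact_mod_cast hpk2.symm
      subst this
      refine ⟨kw, ?_, t, ht, hin⟩
      simpa [List.getD, List.getElem?_eq_getElem hm] using hkw
    · rintro ⟨kw, hkw, t, ht, hin⟩
      refine ⟨t, ht, ?_⟩
      rw [mem_pvScan_iff_isIn]
      refine ⟨kw, ?_, hin⟩
      rw [mem_pvPat]
      exact ⟨m, hm, rfl, by simpa [List.getD, List.getElem?_eq_getElem hm] using hkw⟩
  by_cases hY : (m : Int) ∈ hit
  · rw [if_pos (by rwa [PySem.Set.contains_iff]), if_pos (hmem.1 hY)]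
  · rw [if_neg (by rw [PySem.Set.contains_iff]; exact hY),
        if_neg (by rw [← hmem]; exact hY)]

-- the outer fold over fresh distinct gene keys appends canonical rows
theorem outer_fold (diseases : List (List String)) (l : List (String × List String))
    (c : PySem.Dict String (PySem.Set Int)) (r : PySem.Dict String (List String))
    (hc : pvInv (pvScan (pvBuckets diseases).1 (pvBuckets diseases).2) c)
    (hfresh : ∀ p ∈ l, r.contains p.1 = false)
    (hnd : (l.map (·.1)).Nodup) :
    (l.foldl (fun (st : PySem.Dict String (PySem.Set Int) × PySem.Dict String (List String)) gr =>
        let ch := gr.2.foldl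
          (fun (ch : PySem.Dict String (PySem.Set Int) × PySem.Set Int) t =>
            let cache := if ch.1.contains t then ch.1
              else ch.1.insert t (pvScan (pvBuckets diseases).1 (pvBuckets diseases).2 t)
            (cache, PySem.Set.union ch.2 (cache.getD t PySem.Set.empty)))
          (st.1, PySem.Set.empty)
        (ch.1, st.2.insert gr.1 ((PySem.List.pyRange 0 (diseases.length : Int) 1).map
          (fun k => if PySem.Set.contains ch.2 k then "Y" else "N")))) (c, r)).2.items =
      r.items ++ l.map (fun p => (p.1, pvCanon diseases p.2)) := by
  induction l generalizing c r with
  | nil => simp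
  | cons gr rest ih =>
    simp only [List.foldl_cons, List.map_cons]
    rcases gene_fold (pvScan (pvBuckets diseases).1 (pvBuckets diseases).2) gr.2 c
      PySem.Set.empty hc with ⟨hinv', hmem⟩
    have hflags : (PySem.List.pyRange 0 (diseases.length : Int) 1).map
        (fun k => if PySem.Set.contains (gr.2.foldl
          (fun (ch : PySem.Dict String (PySem.Set Int) × PySem.Set Int) t =>
            let cache := if ch.1.contains t then ch.1
              else ch.1.insert t (pvScan (pvBuckets diseases).1 (pvBuckets diseases).2 t)
            (cache, PySem.Set.union ch.2 (cache.getD t PySem.Set.empty)))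
          (c, PySem.Set.empty)).2 k then "Y" else "N") = pvCanon diseases gr.2 := by
      apply flags_eq_canon
      intro k
      rw [hmem k]
      simp [PySem.Set.empty]
    have hnd' := hnd
    rw [List.map_cons, List.nodup_cons] at hnd'
    rw [ih _ _ hinv'
        (by
          intro p hp
          rw [PySem.Dict.contains_insert]
          have hne : p.1 ≠ gr.1 := by
            intro he
            exact hnd'.1 (he ▸ List.mem_map_of_mem hp)
          simp [hne, hfresh p (List.mem_cons_of_mem _ hp)])
        hnd'.2]
    rw [PySem.Dict.items_insert, hfresh gr (List.mem_cons_self ..)]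
    rw [hflags]
    simp

theorem find_disease_genes_alt_eq_canon (diseases : List (List String)) (diseaseTypes : List String)
    (geneRIFDict : List (String × List String)) :
    find_disease_genes_alt diseases diseaseTypes geneRIFDict =
      (PySem.Dict.ofList geneRIFDict).items.map (fun p => (p.1, pvCanon diseases p.2)) := by
  unfold find_disease_genes_alt
  dsimp only []
  rw [outer_fold diseases _ _ _ (fun t v hv => by simp [PySem.Dict.get?_empty] at hv)
      (fun p _ => PySem.Dict.contains_empty _)
      (by
        have := PySem.Dict.nodup_keys_ofList geneRIFDict
        simpa [PySem.Dict.keys] using this)]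
  rfl

-- ===== VERDICT (by name: the statement is the Claim_ definition above) =====
theorem find_disease_genes_spec : Claim_equal_find_disease_genes := by
  intro diseases diseaseTypes geneRIFDict _
  unfold Spec_find_disease_genes
  rw [find_disease_genes_eq_canon, find_disease_genes_alt_eq_canon]
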